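-- pv_equiv track=rewrite | github.com/dovkh42/AdventOfCode | 2024/day11/day11_p1_solution.py | transform_stones
-- ===== SOURCE A (Python) =====
-- def transform_stones(nums, blinks):
--     for j in range(blinks):
--         new_nums = []
--         for i, num in enumerate(nums):
--             if num == 0:
--                 new_nums.append(1)
--             elif len(str(num)) % 2 == 0:
--                 num1 = int(str(num)[:(len(str(num)) // 2)])
--                 num2 = int(str(num)[(len(str(num)) // 2):])
--                 new_nums.extend([num1, num2])
--             else:
--                 new_nums.append(num * 2024)
--         nums = new_nums
--     return nums
-- ===== SOURCE B (Python) =====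
-- def transform_stones(nums, blinks):
--     # Depth-first with an explicit stack: each stone is fully expanded (left-to-right)
--     # before the next one, appending leaves to the result in order.
--     result = []
--     for num in nums:
--         stack = [(num, blinks)]
--         while stack:
--             n, b = stack.pop()
--             if b <= 0:
--                 result.append(n)
--                 continue
--             if n == 0:
--                 children = [1]
--             else:
--                 s = str(n)
--                 if len(s) % 2 == 0:
--                     half = len(s) // 2
--                     children = [int(s[:half]), int(s[half:])]
--                 else:
--                     children = [n * 2024]
--             for c in reversed(children):
--                 stack.append((c, b - 1))
--     return result
-- ===== Notes on version B (the rewrite author's own statement) =====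
-- stated objective: alternative
-- what changed: Replaces the breadth-first per-blink rebuild of the whole list with a depth-first expansion: each stone is fully expanded for all its blinks via an explicit stack before the next stone, appending leaves to the result in order.
-- outside the precondition, e.g. on transform_stones([-10], 1): A returns [-20240], B returns [-20240]
import Mathlib
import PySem

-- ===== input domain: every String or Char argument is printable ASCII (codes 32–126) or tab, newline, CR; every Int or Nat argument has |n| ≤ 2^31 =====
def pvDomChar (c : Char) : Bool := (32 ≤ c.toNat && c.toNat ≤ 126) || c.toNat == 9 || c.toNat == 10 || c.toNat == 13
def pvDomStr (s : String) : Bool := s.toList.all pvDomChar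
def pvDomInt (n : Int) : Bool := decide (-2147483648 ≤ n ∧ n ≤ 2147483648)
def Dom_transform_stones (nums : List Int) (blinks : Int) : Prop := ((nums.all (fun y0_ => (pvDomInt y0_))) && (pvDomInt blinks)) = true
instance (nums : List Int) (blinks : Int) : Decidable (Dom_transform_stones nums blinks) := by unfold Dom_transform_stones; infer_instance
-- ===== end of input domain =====

-- B changes the traversal shape only (depth-first per-stone expansion instead of
-- breadth-first per-blink rebuild); same ordered result, same asymptotic cost.

-- ===== PORT A =====
-- 'int(...)' is PySem.Int.ofChars? (none = ValueError); '.getD 0' is unreachable under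
-- Pre_transform_stones, which excludes the inputs on which Python A can raise.
def transform_stones (nums : List Int) (blinks : Int) : List Int :=
  (PySem.List.pyRange 0 blinks 1).foldl
    (fun nums _j =>
      (PySem.List.enumerate nums 0).foldl
        (fun new_nums p =>
          let num := p.2
          if num = 0 then new_nums ++ [1]
          else
            let s := PySem.Int.toChars num
            if s.length % 2 = 0 then
              let num1 := (PySem.Int.ofChars? (PySem.List.slice s none (some ((s.length : Int) / 2)))).getD 0
              let num2 := (PySem.Int.ofChars? (PySem.List.slice s (some ((s.length : Int) / 2)) none)).getD 0
              new_nums ++ [num1, num2]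
            else new_nums ++ [num * 2024])
        [])
    nums

-- ===== PORT B =====
-- B-side helper: the children of one stone after one blink (Source B's inline 'children' block)
def pvChildren (num : Int) : List Int :=
  if num = 0 then [1]
  else
    let s := PySem.Int.toChars num
    if s.length % 2 = 0 then
      let half : Int := (s.length : Int) / 2
      [(PySem.Int.ofChars? (PySem.List.slice s none (some half))).getD 0,
       (PySem.Int.ofChars? (PySem.List.slice s (some half) none)).getD 0]
    else [num * 2024]

-- termination measure for the stack loop (cited by pvRun's decreasing_by)
def pvWeight (stack : List (Int × Int)) : Nat := (stack.map (fun p => 3 ^ p.2.toNat)).sum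

lemma pvChildren_length_le (n : Int) : (pvChildren n).length ≤ 2 := by
  by_cases h : n = 0
  · simp [pvChildren, h]
  · rw [pvChildren, if_neg h]
    dsimp only
    split <;> simp

-- Source B's while-loop: Python pushes reversed(children) and pops from the end, which is
-- this list model with the stack top at the head (children in order, then the rest).
def pvRun (stack : List (Int × Int)) (result : List Int) : List Int :=
  match stack with
  | [] => result
  | (n, b) :: rest =>
    if b ≤ 0 then pvRun rest (result ++ [n])
    else pvRun ((pvChildren n).map (fun c => (c, b - 1)) ++ rest) result
termination_by pvWeight stack
decreasing_by
  · simp only [pvWeight, List.map_cons, List.sum_cons]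
    have : 0 < 3 ^ (b.toNat) := pow_pos (by norm_num) _
    omega
  · simp only [pvWeight, List.map_append, List.sum_append, List.map_cons, List.sum_cons,
      List.map_map]
    have hconst : ((fun p : Int × Int => 3 ^ p.2.toNat) ∘ fun c : Int => (c, b - 1))
        = fun _ : Int => 3 ^ ((b - 1).toNat) := rfl
    have h1 : ((pvChildren n).map ((fun p : Int × Int => 3 ^ p.2.toNat) ∘ fun c : Int => (c, b - 1))).sum
        = (pvChildren n).length * 3 ^ ((b - 1).toNat) := by
      rw [hconst, List.map_const', List.sum_replicate, smul_eq_mul]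
    have h2 : (pvChildren n).length ≤ 2 := pvChildren_length_le n
    have h3 : b.toNat = (b - 1).toNat + 1 := by omega
    have h4 : 0 < 3 ^ ((b - 1).toNat) := pow_pos (by norm_num) _
    rw [h1, h3, pow_succ]
    nlinarith

def transform_stones_alt (nums : List Int) (blinks : Int) : List Int :=
  nums.foldl (fun result num => pvRun [(num, blinks)] result) []

-- ===== PRECONDITION & SPEC =====
-- Pre_ excludes lists containing a negative stone when blinks > 0: the digit-split rule on a
-- negative stone's string can reach int('-') and raise ValueError at an input-dependent depth,
-- so the set of raising inputs has no closed form; the exclusion is conservative (on some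
-- excluded inputs A still returns, and B returns the same value there — see the cite).
def Pre_transform_stones (nums : List Int) (blinks : Int) : Prop :=
  blinks ≤ 0 ∨ ∀ n ∈ nums, 0 ≤ n
instance (nums : List Int) (blinks : Int) : Decidable (Pre_transform_stones nums blinks) := by
  unfold Pre_transform_stones; infer_instance

def pvWitness_transform_stones : List Int × Int := ([0, 125, 17], 3)

def Spec_transform_stones (nums : List Int) (blinks : Int) (out : List Int) : Prop := out = transform_stones_alt nums blinks
instance (nums : List Int) (blinks : Int) (out : List Int) : Decidable (Spec_transform_stones nums blinks out) := by unfold Spec_transform_stones; infer_instance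

-- ===== CLAIM (what is proved, stated in full; the proofs are below) =====
def Claim_equal_transform_stones : Prop := ∀ (nums : List Int) (blinks : Int), Dom_transform_stones nums blinks → Pre_transform_stones nums blinks → Spec_transform_stones nums blinks (transform_stones nums blinks)

-- ===== LEMMAS AND PROOFS =====

-- proof-side recursive expansion: the ordered list one stone becomes after `blinks` blinks
def pvExpand (num : Int) (blinks : Int) : List Int :=
  if _h : blinks ≤ 0 then [num]
  else (pvChildren num).foldl (fun out c => out ++ pvExpand c (blinks - 1)) []
termination_by blinks.toNat
decreasing_by omega

-- A's inner loop body appends exactly pvChildren of the current stone.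
lemma innerA_body (new_nums : List Int) (p : Int × Int) :
    (let num := p.2
          if num = 0 then new_nums ++ [1]
          else
            let s := PySem.Int.toChars num
            if s.length % 2 = 0 then
              let num1 := (PySem.Int.ofChars? (PySem.List.slice s none (some ((s.length : Int) / 2)))).getD 0
              let num2 := (PySem.Int.ofChars? (PySem.List.slice s (some ((s.length : Int) / 2)) none)).getD 0
              new_nums ++ [num1, num2]
            else new_nums ++ [num * 2024]) = new_nums ++ pvChildren p.2 := by
  simp only [pvChildren]
  split_ifs <;> rfl

-- one breadth-first pass = flatMap of pvChildren (invariant over the accumulator)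
lemma passA_go (ns : List Int) (s : Int) (acc : List Int) :
    (PySem.List.enumerate ns s).foldl
      (fun new_nums p =>
          let num := p.2
          if num = 0 then new_nums ++ [1]
          else
            let s := PySem.Int.toChars num
            if s.length % 2 = 0 then
              let num1 := (PySem.Int.ofChars? (PySem.List.slice s none (some ((s.length : Int) / 2)))).getD 0
              let num2 := (PySem.Int.ofChars? (PySem.List.slice s (some ((s.length : Int) / 2)) none)).getD 0
              new_nums ++ [num1, num2]
            else new_nums ++ [num * 2024]) acc = acc ++ ns.flatMap pvChildren := by
  induction ns generalizing s acc with
  | nil => simp [PySem.List.enumerate_nil]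
  | cons n ns ih =>
    rw [PySem.List.enumerate_cons, List.foldl_cons, innerA_body acc (s, n), ih]
    simp

lemma passA (ns : List Int) :
    (PySem.List.enumerate ns 0).foldl
      (fun new_nums p =>
          let num := p.2
          if num = 0 then new_nums ++ [1]
          else
            let s := PySem.Int.toChars num
            if s.length % 2 = 0 then
              let num1 := (PySem.Int.ofChars? (PySem.List.slice s none (some ((s.length : Int) / 2)))).getD 0
              let num2 := (PySem.Int.ofChars? (PySem.List.slice s (some ((s.length : Int) / 2)) none)).getD 0
              new_nums ++ [num1, num2]
            else new_nums ++ [num * 2024]) [] = ns.flatMap pvChildren := by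
  rw [passA_go, List.nil_append]

-- A as k-fold iteration of the single pass
lemma A_iter_nat (k : Nat) (nums : List Int) :
    transform_stones nums (k : Int) = (fun ns => ns.flatMap pvChildren)^[k] nums := by
  unfold transform_stones
  induction k generalizing nums with
  | zero => simp [PySem.List.pyRange_one_eq_nil]
  | succ k ih =>
    have hc : ((k + 1 : Nat) : Int) = (k : Int) + 1 := by push_cast; ring
    rw [hc, PySem.List.pyRange_one_succ_right (by exact_mod_cast Nat.zero_le k),
        List.foldl_append, ih, Function.iterate_succ_apply']
    simp [passA]

lemma A_eq_iter (nums : List Int) (blinks : Int) :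
    transform_stones nums blinks = (fun ns => ns.flatMap pvChildren)^[blinks.toNat] nums := by
  by_cases hb : blinks ≤ 0
  · unfold transform_stones
    rw [PySem.List.pyRange_one_eq_nil hb]
    simp [Int.toNat_of_nonpos hb]
  · have hb' : blinks = (blinks.toNat : Int) := by omega
    conv_lhs => rw [hb']
    rw [A_iter_nat]

-- B's expand, unfolded for positive blinks
lemma expand_pos (num : Int) (blinks : Int) (hb : 0 < blinks) :
    pvExpand num blinks = (pvChildren num).flatMap (fun c => pvExpand c (blinks - 1)) := by
  rw [pvExpand]
  rw [dif_neg (by omega)]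
  rw [PySem.List.foldl_append_eq_flatMap (fun c => pvExpand c (blinks - 1))]
  simp

-- B's depth-first expansion equals k-fold breadth-first iteration
lemma B_eq_iter (k : Nat) (nums : List Int) :
    nums.flatMap (fun n => pvExpand n (k : Int)) = (fun ns => ns.flatMap pvChildren)^[k] nums := by
  induction k generalizing nums with
  | zero =>
    simp [pvExpand]
  | succ k ih =>
    have hcast : ((k + 1 : Nat) : Int) = (k : Int) + 1 := by push_cast; ring
    have h1 : ∀ n : Int, pvExpand n ((k + 1 : Nat) : Int)
        = (pvChildren n).flatMap (fun c => pvExpand c (k : Int)) := by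
      intro n
      rw [hcast, expand_pos n _ (by positivity)]
      simp
    calc nums.flatMap (fun n => pvExpand n ((k + 1 : Nat) : Int))
        = nums.flatMap (fun n => (pvChildren n).flatMap (fun c => pvExpand c (k : Int))) := by
          simp only [h1]
      _ = (nums.flatMap pvChildren).flatMap (fun c => pvExpand c (k : Int)) := by
          rw [List.flatMap_assoc]
      _ = (fun ns => ns.flatMap pvChildren)^[k] (nums.flatMap pvChildren) := ih _
      _ = _ := by rw [Function.iterate_succ_apply]

-- the stack loop computes the concatenated expansions of everything on the stack
lemma pvRun_spec (stack : List (Int × Int)) (result : List Int) :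
    pvRun stack result = result ++ stack.flatMap (fun p => pvExpand p.1 p.2) := by
  induction stack, result using pvRun.induct with
  | case1 result => simp [pvRun]
  | case2 result n b rest hb ih =>
    rw [pvRun, if_pos hb, ih]
    have : pvExpand n b = [n] := by rw [pvExpand, dif_pos hb]
    simp [this]
  | case3 result n b rest hb ih =>
    rw [pvRun, if_neg hb, ih]
    simp only [List.flatMap_append, List.flatMap_map, List.flatMap_cons]
    rw [expand_pos n b (by omega)]

-- B as a flatMap of pvExpand
lemma B_eq_flatMap (nums : List Int) (blinks : Int) :
    transform_stones_alt nums blinks = nums.flatMap (fun n => pvExpand n blinks) := by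
  unfold transform_stones_alt
  have h : ∀ (r : List Int) (num : Int), pvRun [(num, blinks)] r = r ++ pvExpand num blinks := by
    intro r num; rw [pvRun_spec]; simp
  simp only [h]
  rw [PySem.List.foldl_append_eq_flatMap (fun n => pvExpand n blinks), List.nil_append]

-- ===== VERDICT (by name: the statement is the Claim_ definition above) =====
theorem transform_stones_spec : Claim_equal_transform_stones := by
  intro nums blinks _ _
  unfold Spec_transform_stones
  rw [A_eq_iter, B_eq_flatMap]
  by_cases hb : blinks ≤ 0
  · have h0 : blinks.toNat = 0 := by omega
    rw [h0, Function.iterate_zero_apply]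
    have : ∀ n : Int, pvExpand n blinks = [n] := by
      intro n; rw [pvExpand, dif_pos hb]
    simp [this]
  · rw [← B_eq_iter, show ((blinks.toNat : Int)) = blinks from by omega]
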